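-- pv_equiv track=rewrite | github.com/npqjz/M-R-CP-ABE | TimePeriodTree.py | match_sets
-- ===== SOURCE A (Python) =====
-- def match_sets(set_a, set_b):
--   results = []
--
--   for b_path in set_b:
--      b_parts = b_path.split('/')
--      best_match = None
--      max_depth = -1
--      remainder = ''
--
--      # 遍历 set_a 中的每个路径，寻找最长前缀匹配
--      for a_path in set_a:
--            a_parts = a_path.split('/')
--
--            # 如果 a 的层级比 b 深，无法成为前缀
--            if len(a_parts) > len(b_parts):
--               continue
--
--            # 检查是否逐级匹配
--            is_prefix = True
--            for i in range(len(a_parts)):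
--               if a_parts[i] != b_parts[i]:
--                  is_prefix = False
--                  break
--
--            # 更新最长匹配
--            if is_prefix and len(a_parts) > max_depth:
--               max_depth = len(a_parts)
--               best_match = a_path
--               remainder = '/'.join(b_parts[len(a_parts):])
--
--      # 若无匹配则报错
--      if best_match is None:
--            raise ValueError(f"No matching prefix found for '{b_path}' in set_a")
--
--      results.append((best_match, remainder))
--
--   return results
-- ===== SOURCE B (Python) =====
-- def match_sets(set_a, set_b):
--     a_set = set(set_a)
--     results = []
--     for b_path in set_b:
--         parts = b_path.split('/')
--         for k in range(len(parts), 0, -1):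
--             prefix = '/'.join(parts[:k])
--             if prefix in a_set:
--                 results.append((prefix, '/'.join(parts[k:])))
--                 break
--         else:
--             raise ValueError(f"No matching prefix found for '{b_path}' in set_a")
--     return results
-- ===== Notes on version B (the rewrite author's own statement) =====
-- stated objective: faster
-- what changed: Instead of scanning all of set_a for every b_path with a per-candidate component-wise prefix check, B builds a hash set of set_a once and probes each b_path's own prefixes longest-first, returning the first one present.
import Mathlib
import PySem

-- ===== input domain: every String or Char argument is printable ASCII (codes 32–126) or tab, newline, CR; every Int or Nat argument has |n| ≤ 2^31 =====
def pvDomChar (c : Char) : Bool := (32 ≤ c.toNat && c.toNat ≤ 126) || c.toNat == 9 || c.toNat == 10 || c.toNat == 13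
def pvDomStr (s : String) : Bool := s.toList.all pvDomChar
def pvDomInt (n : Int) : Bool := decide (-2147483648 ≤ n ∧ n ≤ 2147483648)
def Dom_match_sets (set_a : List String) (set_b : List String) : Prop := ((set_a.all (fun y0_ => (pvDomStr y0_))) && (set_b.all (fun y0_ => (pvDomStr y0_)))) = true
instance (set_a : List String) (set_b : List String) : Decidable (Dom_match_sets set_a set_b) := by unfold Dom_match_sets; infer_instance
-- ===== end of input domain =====

-- B replaces A's scan of all of set_a per b_path (with a component-wise prefix
-- check per candidate) by one hash set of set_a probed with each b_path's own
-- prefixes longest-first; objective: faster.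

-- shared builtins: s.split('/') and '/'.join(l), via PySem
def msSplit (s : String) : List String := (PySem.Str.split? s "/").getD []
def msJoin (l : List String) : String := PySem.Str.join "/" l

-- ===== PORT A =====
-- the inner index loop 'for i in range(len(a_parts)): if a_parts[i] != b_parts[i]: …'
def msIsPrefixLoop (ap bp : List String) (i : Nat) : Bool :=
  if i < ap.length then
    if ap.getD i "" != bp.getD i "" then false
    else msIsPrefixLoop ap bp (i + 1)
  else true
termination_by ap.length - i
decreasing_by omega

-- the inner 'for a_path in set_a' loop; state = (best_match, max_depth, remainder)
def msInnerA (bparts : List String) : List String → (Option String × Int × String) → (Option String × Int × String)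
  | [], st => st
  | a :: rest, (best, maxd, rem) =>
    let ap := msSplit a
    if ap.length > bparts.length then
      msInnerA bparts rest (best, maxd, rem)
    else if msIsPrefixLoop ap bparts 0 && decide ((ap.length : Int) > maxd) then
      msInnerA bparts rest (some a, (ap.length : Int), msJoin (bparts.drop ap.length))
    else
      msInnerA bparts rest (best, maxd, rem)

def match_sets (set_a : List String) (set_b : List String) : List (String × String) :=
  set_b.foldl (fun results b_path =>
    let bparts := msSplit b_path
    match msInnerA bparts set_a (none, -1, "") with
    | (some best, _, rem) => results ++ [(best, rem)]
    | (none, _, _) => results   -- Python raises ValueError here; excluded by Pre_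
    ) []

-- ===== PORT B =====
-- probe k = len(parts) … 1 (longest first); first prefix found in the set wins
def msProbe (aset : PySem.Set String) (parts : List String) : Nat → Option (String × String)
  | 0 => none   -- loop fell through: Python raises ValueError; excluded by Pre_
  | k + 1 =>
    let p := msJoin (parts.take (k + 1))
    if aset.contains p then some (p, msJoin (parts.drop (k + 1)))
    else msProbe aset parts k

def match_sets_alt (set_a : List String) (set_b : List String) : List (String × String) :=
  let aset := PySem.Set.ofList set_a
  set_b.filterMap (fun b_path =>
    let parts := msSplit b_path
    msProbe aset parts parts.length)

-- ===== PRECONDITION & SPEC =====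
-- Pre_ excludes exactly the inputs where some b_path has no '/'-component prefix
-- in set_a: there Python A (and Python B) raise ValueError.
def Pre_match_sets (set_a : List String) (set_b : List String) : Prop :=
  ∀ b ∈ set_b, ∃ a ∈ set_a,
    (PySem.Chars.splitOn a.toList ['/']) <+: (PySem.Chars.splitOn b.toList ['/'])
instance (set_a : List String) (set_b : List String) : Decidable (Pre_match_sets set_a set_b) := by unfold Pre_match_sets; infer_instance

def pvWitness_match_sets : List String × List String := (["a", "a/b"], ["a/b/c", "a"])

def Spec_match_sets (set_a : List String) (set_b : List String) (out : List (String × String)) : Prop := out = match_sets_alt set_a set_b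
instance (set_a : List String) (set_b : List String) (out : List (String × String)) : Decidable (Spec_match_sets set_a set_b out) := by unfold Spec_match_sets; infer_instance

-- ===== CLAIM (what is proved, stated in full; the proofs are below) =====
def Claim_equal_match_sets : Prop := ∀ (set_a : List String) (set_b : List String), Dom_match_sets set_a set_b → Pre_match_sets set_a set_b → Spec_match_sets set_a set_b (match_sets set_a set_b)

-- ===== LEMMAS AND PROOFS =====
set_option maxHeartbeats 1000000

-- clean recursive model of s.split('/')
def pieces : List Char → List (List Char)
  | [] => [[]]
  | c :: rest =>
    if c = '/' then [] :: pieces rest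
    else
      match pieces rest with
      | [] => [[c]]
      | p :: ps => (c :: p) :: ps

theorem pieces_ne_nil (cs : List Char) : pieces cs ≠ [] := by
  induction cs with
  | nil => simp [pieces]
  | cons c rest ih =>
    simp only [pieces]
    split
    · simp
    · cases h : pieces rest <;> simp

theorem splitOn_go_eq (l : List Char) : ∀ (fuel : Nat) (cur : List Char) (acc : List (List Char)),
    l.length < fuel →
    PySem.Chars.splitOn.go ['/'] fuel l cur acc
      = acc.reverse ++ (pieces l).modifyHead (fun p => cur.reverse ++ p) := by
  induction l with
  | nil =>
    intro fuel cur acc h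
    cases fuel with
    | zero => omega
    | succ f => simp [PySem.Chars.splitOn.go, pieces]
  | cons c rest ih =>
    intro fuel cur acc h
    cases fuel with
    | zero => simp at h
    | succ f =>
      by_cases hc : c = '/'
      · subst hc
        rw [show PySem.Chars.splitOn.go ['/'] (f+1) ('/' :: rest) cur acc
              = PySem.Chars.splitOn.go ['/'] f rest [] (cur.reverse :: acc) by
            simp [PySem.Chars.splitOn.go, List.isPrefixOf]]
        rw [ih f [] (cur.reverse :: acc) (by simp at h; omega)]
        cases hp : pieces rest with
        | nil => exact absurd hp (pieces_ne_nil rest)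
        | cons p ps => simp [pieces, hp]
      · rw [show PySem.Chars.splitOn.go ['/'] (f+1) (c :: rest) cur acc
              = PySem.Chars.splitOn.go ['/'] f rest (c :: cur) acc by
            simp [PySem.Chars.splitOn.go, List.isPrefixOf, Ne.symm hc]]
        rw [ih f (c :: cur) acc (by simp at h; omega)]
        cases hp : pieces rest with
        | nil => exact absurd hp (pieces_ne_nil rest)
        | cons p ps => simp [pieces, hc, hp]

theorem splitOn_eq_pieces (cs : List Char) : PySem.Chars.splitOn cs ['/'] = pieces cs := by
  rw [PySem.Chars.splitOn, splitOn_go_eq cs (cs.length + 1) [] [] (by omega)]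
  cases hp : pieces cs with
  | nil => exact absurd hp (pieces_ne_nil cs)
  | cons p ps => simp

theorem join_cons_char (sep : List Char) (c : Char) (p : List Char) (ps : List (List Char)) :
    PySem.Chars.join sep ((c :: p) :: ps) = c :: PySem.Chars.join sep (p :: ps) := by
  cases ps with
  | nil => simp [PySem.Chars.join_singleton]
  | cons q t => simp [PySem.Chars.join_cons_cons]

theorem join_pieces (cs : List Char) : PySem.Chars.join ['/'] (pieces cs) = cs := by
  induction cs with
  | nil => simp [pieces, PySem.Chars.join_singleton]
  | cons c rest ih =>
    by_cases hc : c = '/'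
    · subst hc
      cases hp : pieces rest with
      | nil => exact absurd hp (pieces_ne_nil rest)
      | cons p ps =>
        rw [pieces, if_pos rfl, hp, PySem.Chars.join_cons_cons, ← hp, ih]
        simp
    · cases hp : pieces rest with
      | nil => exact absurd hp (pieces_ne_nil rest)
      | cons p ps =>
        rw [pieces, if_neg hc, hp, join_cons_char, ← hp, ih]

theorem slash_not_mem_pieces (cs : List Char) : ∀ p ∈ pieces cs, '/' ∉ p := by
  induction cs with
  | nil => simp [pieces]
  | cons c rest ih =>
    by_cases hc : c = '/'
    · subst hc
      rw [pieces, if_pos rfl]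
      intro p hp
      rcases List.mem_cons.mp hp with h | h
      · simp [h]
      · exact ih p h
    · cases hp : pieces rest with
      | nil => exact absurd hp (pieces_ne_nil rest)
      | cons q ps =>
        rw [pieces, if_neg hc, hp]
        intro p hpm
        rcases List.mem_cons.mp hpm with h | h
        · subst h
          have hq : '/' ∉ q := ih q (by rw [hp]; exact List.mem_cons_self)
          simp only [List.mem_cons]
          rintro (h | h)
          · exact hc h.symm
          · exact hq h
        · exact ih p (by rw [hp]; exact List.mem_cons_of_mem _ h)

theorem pieces_append (p cs : List Char) (hp : '/' ∉ p) :
    pieces (p ++ cs) = (pieces cs).modifyHead (fun q => p ++ q) := by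
  induction p with
  | nil =>
    cases hcs : pieces cs with
    | nil => exact absurd hcs (pieces_ne_nil cs)
    | cons q ps => simp [hcs]
  | cons c t ih =>
    have hc : c ≠ '/' := by intro h; exact hp (by simp [h])
    have ht : '/' ∉ t := by intro h; exact hp (List.mem_cons_of_mem _ h)
    rw [List.cons_append, pieces, if_neg hc, ih ht]
    cases hcs : pieces cs with
    | nil => exact absurd hcs (pieces_ne_nil cs)
    | cons q ps => simp

theorem pieces_join (l : List (List Char)) (hne : l ≠ [])
    (hfree : ∀ p ∈ l, '/' ∉ p) :
    pieces (PySem.Chars.join ['/'] l) = l := by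
  induction l with
  | nil => exact absurd rfl hne
  | cons p ps ih =>
    cases ps with
    | nil =>
      rw [PySem.Chars.join_singleton, ← List.append_nil p,
          pieces_append p [] (hfree p List.mem_cons_self)]
      simp [pieces]
    | cons q t =>
      rw [PySem.Chars.join_cons_cons, List.append_assoc,
          pieces_append p _ (hfree p List.mem_cons_self)]
      have h2 : pieces ('/' :: PySem.Chars.join ['/'] (q :: t)) = [] :: pieces (PySem.Chars.join ['/'] (q :: t)) := by
        rw [pieces, if_pos rfl]
      rw [show ['/'] ++ PySem.Chars.join ['/'] (q :: t) = '/' :: PySem.Chars.join ['/'] (q :: t) from rfl,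
          h2, ih (by simp) (fun r hr => hfree r (List.mem_cons_of_mem _ hr))]
      simp

-- lift to the String-level helpers
theorem msSplit_eq (s : String) : msSplit s = (pieces s.toList).map String.ofList := by
  rw [msSplit, PySem.Str.split?]
  simp [PySem.Chars.split?, splitOn_eq_pieces]

theorem msJoin_eq (l : List String) :
    msJoin l = String.ofList (PySem.Chars.join ['/'] (l.map String.toList)) := by
  rfl

theorem msSplit_ne_nil (s : String) : msSplit s ≠ [] := by
  rw [msSplit_eq]
  intro h
  exact pieces_ne_nil s.toList (by simpa using h)

theorem join_msSplit (s : String) : msJoin (msSplit s) = s := by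
  rw [msSplit_eq, msJoin_eq]
  have h : (List.map String.ofList (pieces s.toList)).map String.toList = pieces s.toList := by
    rw [List.map_map]
    have hid : (String.toList ∘ String.ofList) = id := by funext p; simp
    rw [hid, List.map_id]
  rw [h, join_pieces, String.ofList_toList]

-- splitting the joined k-prefix of a split gives back the k-prefix
theorem msSplit_join_take (b : String) (k : Nat) (hk : 1 ≤ k) :
    msSplit (msJoin ((msSplit b).take k)) = (msSplit b).take k := by
  rw [msSplit_eq b, msJoin_eq, ← List.map_take, List.map_map]
  have hid : (String.toList ∘ String.ofList) = id := by funext p; simp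
  rw [hid, List.map_id, msSplit_eq]
  have hne : (pieces b.toList).take k ≠ [] := by
    cases h : pieces b.toList with
    | nil => exact absurd h (pieces_ne_nil b.toList)
    | cons p ps =>
      cases k with
      | zero => omega
      | succ m => simp
  rw [String.toList_ofList, pieces_join _ hne
        (fun p hp => slash_not_mem_pieces b.toList p (List.mem_of_mem_take hp)),
      List.map_take]

-- a path that is a component-prefix of bp IS the joined take of bp
theorem eq_join_take_of_prefix (a : String) (bp : List String) (h : msSplit a <+: bp) :
    a = msJoin (bp.take (msSplit a).length) := by
  rw [List.prefix_iff_eq_take] at h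
  rw [← h, join_msSplit]

theorem depth_pos (a : String) : 1 ≤ (msSplit a).length := by
  cases h : msSplit a with
  | nil => exact absurd h (msSplit_ne_nil a)
  | cons p ps => simp

-- the A-side index loop is the component-wise prefix test
theorem msIsPrefixLoop_spec (ap bp : List String) (hlen : ap.length ≤ bp.length) (i : Nat) :
    msIsPrefixLoop ap bp i = (ap.drop i).isPrefixOf (bp.drop i) := by
  rw [msIsPrefixLoop]
  by_cases hi : i < ap.length
  · have hib : i < bp.length := by omega
    have hga : ap.getD i "" = ap[i] := by
      simp [List.getD_eq_getElem?_getD, List.getElem?_eq_getElem hi]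
    have hgb : bp.getD i "" = bp[i] := by
      simp [List.getD_eq_getElem?_getD, List.getElem?_eq_getElem hib]
    rw [if_pos hi, hga, hgb,
        ← List.getElem_cons_drop (as := ap) hi, ← List.getElem_cons_drop (as := bp) hib]
    have hred : (ap[i] :: ap.drop (i+1)).isPrefixOf (bp[i] :: bp.drop (i+1))
        = ((ap[i] == bp[i]) && (ap.drop (i+1)).isPrefixOf (bp.drop (i+1))) := rfl
    rw [hred]
    by_cases he : ap[i] = bp[i]
    · have hbne : (ap[i] != bp[i]) = false := by simp [he]
      rw [hbne]
      simp only [Bool.false_eq_true, if_false]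
      rw [msIsPrefixLoop_spec ap bp hlen (i+1)]
      simp [he]
    · have hbne : (ap[i] != bp[i]) = true := by simp [he]
      rw [hbne]
      simp [he]
  · rw [if_neg hi, List.drop_eq_nil_of_le (by omega : ap.length ≤ i)]
    rfl
termination_by ap.length - i
decreasing_by omega

-- abbreviations for the canonical answer at depth k (relative to bp)
def strK (bp : List String) (k : Nat) : String := msJoin (bp.take k)
def remK (bp : List String) (k : Nat) : String := msJoin (bp.drop k)
def stateOf (bp : List String) : Option Nat → (Option String × Int × String)
  | none => (none, -1, "")
  | some k => (some (strK bp k), (k : Int), remK bp k)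

-- the pure "max depth so far" update A's inner loop performs
def updD (bp : List String) (o : Option Nat) (a : String) : Option Nat :=
  if (msSplit a).length ≤ bp.length ∧ msSplit a <+: bp ∧ o.getD 0 < (msSplit a).length
  then some (msSplit a).length else o

theorem innerA_cons (bp : List String) (a : String) (rest : List String) (o : Option Nat) :
    msInnerA bp (a :: rest) (stateOf bp o) = msInnerA bp rest (stateOf bp (updD bp o a)) := by
  have hd := depth_pos a
  cases o with
  | none =>
    simp only [stateOf, msInnerA]
    by_cases h1 : (msSplit a).length > bp.length
    · rw [if_pos h1, updD, if_neg (by rintro ⟨h, -, -⟩; omega)]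
    · rw [if_neg h1]
      have hpre : msIsPrefixLoop (msSplit a) bp 0 = (msSplit a).isPrefixOf bp := by
        simpa using msIsPrefixLoop_spec (msSplit a) bp (by omega) 0
      by_cases h2 : msSplit a <+: bp
      · rw [if_pos (by
            rw [hpre]
            simp only [Bool.and_eq_true, List.isPrefixOf_iff_prefix, decide_eq_true_eq]
            exact ⟨h2, by omega⟩),
          updD, if_pos ⟨by omega, h2, by simpa using hd⟩]
        simp only [strK, remK, ← eq_join_take_of_prefix a bp h2]
      · rw [if_neg (by
            rw [hpre]
            simp only [Bool.and_eq_true, List.isPrefixOf_iff_prefix, decide_eq_true_eq]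
            rintro ⟨h, -⟩
            exact h2 h),
          updD, if_neg (by rintro ⟨-, h, -⟩; exact h2 h)]
  | some k =>
    simp only [stateOf, msInnerA]
    by_cases h1 : (msSplit a).length > bp.length
    · rw [if_pos h1, updD, if_neg (by rintro ⟨h, -, -⟩; omega)]
    · rw [if_neg h1]
      have hpre : msIsPrefixLoop (msSplit a) bp 0 = (msSplit a).isPrefixOf bp := by
        simpa using msIsPrefixLoop_spec (msSplit a) bp (by omega) 0
      by_cases h2 : msSplit a <+: bp
      · by_cases h3 : k < (msSplit a).length
        · rw [if_pos (by
              rw [hpre]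
              simp only [Bool.and_eq_true, List.isPrefixOf_iff_prefix, decide_eq_true_eq]
              exact ⟨h2, by omega⟩),
            updD, if_pos ⟨by omega, h2, by simpa using h3⟩]
          simp only [strK, remK, ← eq_join_take_of_prefix a bp h2]
        · rw [if_neg (by
              rw [hpre]
              simp only [Bool.and_eq_true, List.isPrefixOf_iff_prefix, decide_eq_true_eq]
              rintro ⟨-, h⟩
              omega),
            updD, if_neg (by rintro ⟨-, -, h⟩; simp at h; omega)]
      · rw [if_neg (by
            rw [hpre]
            simp only [Bool.and_eq_true, List.isPrefixOf_iff_prefix, decide_eq_true_eq]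
            rintro ⟨h, -⟩
            exact h2 h),
          updD, if_neg (by rintro ⟨-, h, -⟩; exact h2 h)]

theorem innerA_spec (bp : List String) (l : List String) : ∀ (o : Option Nat),
    msInnerA bp l (stateOf bp o) = stateOf bp (l.foldl (updD bp) o) := by
  induction l with
  | nil => intro o; rfl
  | cons a rest ih =>
    intro o
    rw [innerA_cons, ih]
    rfl

-- characterisation of the foldl of updD
theorem foldl_updD_some (bp : List String) (l : List String) : ∀ (o : Option Nat) (k : Nat),
    l.foldl (updD bp) o = some k →
    (o = some k ∨ ∃ a ∈ l, (msSplit a).length = k ∧ msSplit a <+: bp) := by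
  induction l with
  | nil => intro o k h; exact Or.inl h
  | cons a rest ih =>
    intro o k h
    rcases ih (updD bp o a) k h with h' | h'
    · by_cases hc : (msSplit a).length ≤ bp.length ∧ msSplit a <+: bp ∧ o.getD 0 < (msSplit a).length
      · rw [updD, if_pos hc] at h'
        injection h' with h''
        exact Or.inr ⟨a, List.mem_cons_self, h'', hc.2.1⟩
      · rw [updD, if_neg hc] at h'
        exact Or.inl h'
    · obtain ⟨a', hm, hp⟩ := h'
      exact Or.inr ⟨a', List.mem_cons_of_mem _ hm, hp⟩

theorem foldl_updD_mono (bp : List String) (l : List String) : ∀ (o : Option Nat) (k : Nat),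
    o = some k → ∃ k', l.foldl (updD bp) o = some k' ∧ k ≤ k' := by
  induction l with
  | nil => intro o k h; exact ⟨k, h, le_refl k⟩
  | cons a rest ih =>
    intro o k h
    subst h
    by_cases hc : (msSplit a).length ≤ bp.length ∧ msSplit a <+: bp ∧ (some k : Option Nat).getD 0 < (msSplit a).length
    · have hk : k < (msSplit a).length := by simpa using hc.2.2
      obtain ⟨k', hk', hle⟩ := ih (updD bp (some k) a) (msSplit a).length (by rw [updD, if_pos hc])
      exact ⟨k', hk', by omega⟩
    · exact ih (updD bp (some k) a) k (by rw [updD, if_neg hc])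

theorem foldl_updD_ge (bp : List String) (l : List String) : ∀ (o : Option Nat) (a : String),
    a ∈ l → msSplit a <+: bp →
    ∃ k', l.foldl (updD bp) o = some k' ∧ (msSplit a).length ≤ k' := by
  induction l with
  | nil => intro o a h; exact absurd h List.not_mem_nil
  | cons x rest ih =>
    intro o a hmem hpre
    rcases List.mem_cons.mp hmem with h | h
    · subst h
      have hlen : (msSplit a).length ≤ bp.length := hpre.length_le
      cases o with
      | none =>
        exact foldl_updD_mono bp rest _ _ (by
          rw [updD, if_pos ⟨hlen, hpre, by simpa using depth_pos a⟩])
      | some k =>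
        by_cases hk : k < (msSplit a).length
        · exact foldl_updD_mono bp rest _ _ (by
            rw [updD, if_pos ⟨hlen, hpre, by simpa using hk⟩])
        · obtain ⟨k', h1, h2⟩ := foldl_updD_mono bp rest (updD bp (some k) a) k (by
            rw [updD, if_neg (by rintro ⟨-, -, h⟩; simp at h; omega)])
          exact ⟨k', h1, by omega⟩
    · exact ih (updD bp o x) a h hpre

theorem msProbe_none (sa : List String) (bp : List String) : ∀ (n : Nat),
    (∀ j, 1 ≤ j → j ≤ n → strK bp j ∉ sa) →
    msProbe (PySem.Set.ofList sa) bp n = none := by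
  intro n
  induction n with
  | zero => intro _; rfl
  | succ m ih =>
    intro h
    rw [msProbe]
    rw [if_neg (by
      intro hc
      rw [PySem.Set.contains_iff, PySem.Set.mem_ofList] at hc
      exact h (m+1) (by omega) (le_refl _) hc)]
    exact ih (fun j h1 h2 => h j h1 (by omega))

theorem msProbe_found (sa : List String) (bp : List String) : ∀ (n k : Nat),
    1 ≤ k → k ≤ n → strK bp k ∈ sa →
    (∀ j, k < j → j ≤ n → strK bp j ∉ sa) →
    msProbe (PySem.Set.ofList sa) bp n = some (strK bp k, remK bp k) := by
  intro n
  induction n with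
  | zero => intro k h1 h2; omega
  | succ m ih =>
    intro k h1 h2 hmem hmax
    by_cases hk : k = m + 1
    · subst hk
      rw [msProbe, if_pos (by rw [PySem.Set.contains_iff, PySem.Set.mem_ofList]; exact hmem)]
      rfl
    · rw [msProbe, if_neg (by
        intro hc
        rw [PySem.Set.contains_iff, PySem.Set.mem_ofList] at hc
        exact hmax (m+1) (by omega) (le_refl _) hc)]
      exact ih k h1 (by omega) hmem (fun j ha hb => hmax j ha (by omega))

-- the per-k equivalence of the two match conditions
theorem exists_prefix_iff_mem (sa : List String) (b : String) (k : Nat)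
    (hk1 : 1 ≤ k) (hk2 : k ≤ (msSplit b).length) :
    (∃ a ∈ sa, (msSplit a).length = k ∧ msSplit a <+: msSplit b) ↔ strK (msSplit b) k ∈ sa := by
  constructor
  · rintro ⟨a, hmem, hlen, hpre⟩
    have h := eq_join_take_of_prefix a (msSplit b) hpre
    rw [hlen] at h
    rw [strK, ← h]
    exact hmem
  · intro hmem
    refine ⟨strK (msSplit b) k, hmem, ?_, ?_⟩
    · rw [strK, msSplit_join_take b k hk1, List.length_take]
      omega
    · rw [strK, msSplit_join_take b k hk1]
      exact List.take_prefix k _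

-- any depth reached by the fold is a legal k
theorem foldl_updD_le (bp : List String) (l : List String) (k : Nat)
    (h : l.foldl (updD bp) none = some k) : 1 ≤ k ∧ k ≤ bp.length := by
  rcases foldl_updD_some bp l none k h with h' | ⟨a, _, hlen, hpre⟩
  · exact absurd h' (by simp)
  · have h1 := depth_pos a
    have h2 := hpre.length_le
    omega

-- per-b_path agreement of the two inner computations
theorem per_path_eq (sa : List String) (b : String) :
    (match msInnerA (msSplit b) sa (none, -1, "") with
      | (some best, _, rem) => some (best, rem)
      | (none, _, _) => none)
    = msProbe (PySem.Set.ofList sa) (msSplit b) (msSplit b).length := by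
  have hA : msInnerA (msSplit b) sa (none, -1, "") = stateOf (msSplit b) (sa.foldl (updD (msSplit b)) none) :=
    innerA_spec (msSplit b) sa none
  cases hr : sa.foldl (updD (msSplit b)) none with
  | none =>
    rw [hA, hr]
    rw [msProbe_none sa (msSplit b) (msSplit b).length (by
      intro j h1 h2 hmem
      obtain ⟨a, hm, hlen, hpre⟩ := (exists_prefix_iff_mem sa b j h1 h2).mpr hmem
      obtain ⟨k', hk', -⟩ := foldl_updD_ge (msSplit b) sa none a hm hpre
      rw [hr] at hk'
      exact absurd hk' (by simp))]
    rfl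
  | some k =>
    obtain ⟨hk1, hk2⟩ := foldl_updD_le (msSplit b) sa k hr
    rcases foldl_updD_some (msSplit b) sa none k hr with h' | ⟨a, hm, hlen, hpre⟩
    · exact absurd h' (by simp)
    · have hmem : strK (msSplit b) k ∈ sa := (exists_prefix_iff_mem sa b k hk1 hk2).mp ⟨a, hm, hlen, hpre⟩
      rw [hA, hr, msProbe_found sa (msSplit b) (msSplit b).length k hk1 hk2 hmem (by
        intro j hj1 hj2 hmemj
        obtain ⟨a', hm', hlen', hpre'⟩ := (exists_prefix_iff_mem sa b j (by omega) hj2).mpr hmemj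
        obtain ⟨k'', hk'', hge⟩ := foldl_updD_ge (msSplit b) sa none a' hm' hpre'
        rw [hr] at hk''
        injection hk'' with hk''
        omega)]
      rfl

-- the outer loops: fold-append-with-skip = filterMap, element by element
theorem outer_eq (sa : List String) (l : List String) : ∀ (acc : List (String × String)),
    l.foldl (fun results b_path =>
        match msInnerA (msSplit b_path) sa (none, -1, "") with
        | (some best, _, rem) => results ++ [(best, rem)]
        | (none, _, _) => results) acc
      = acc ++ l.filterMap (fun b_path =>
          msProbe (PySem.Set.ofList sa) (msSplit b_path) (msSplit b_path).length) := by
  induction l with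
  | nil => intro acc; simp
  | cons b t ih =>
    intro acc
    simp only [List.foldl_cons, List.filterMap_cons]
    have hsplit : (match msInnerA (msSplit b) sa (none, -1, "") with
          | (some best, _, rem) => acc ++ [(best, rem)]
          | (none, _, _) => acc)
        = (match msProbe (PySem.Set.ofList sa) (msSplit b) (msSplit b).length with
          | some y => acc ++ [y]
          | none => acc) := by
      rw [← per_path_eq sa b]
      rcases msInnerA (msSplit b) sa (none, -1, "") with ⟨_ | best, d, r⟩ <;> rfl
    rw [hsplit]
    cases hm : msProbe (PySem.Set.ofList sa) (msSplit b) (msSplit b).length with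
    | none => exact ih acc
    | some y =>
      rw [ih (acc ++ [y])]
      simp

-- ===== VERDICT (by name: the statement is the Claim_ definition above) =====
theorem match_sets_spec : Claim_equal_match_sets := by
  intro set_a set_b _ _
  unfold Spec_match_sets match_sets match_sets_alt
  rw [outer_eq set_a set_b []]
  rfl
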